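-- pv_equiv track=rewrite | github.com/bludano/aoc2022 | src/day05/rearrangement.py | get_initial_configuration_and_instructions_from_lines
-- ===== SOURCE A (Python) =====
-- from typing import Tuple, Iterable, List
--
-- def get_initial_configuration_and_instructions_from_lines(lines: Iterable[str]) -> Tuple[Iterable[str], Iterable[str], Iterable[int]]:
--     found_separator_line = False
--     initial_configuration_lines = []
--     instruction_lines = []
--     indices = []
--     for line in lines:
--         if line == '':
--             found_separator_line = True
--             continue
--         if found_separator_line:
--             instruction_lines.append(line)
--         elif '[' not in line and ']' not in line:
--             for i, char in enumerate(line):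
--                 if char != ' ':
--                     indices.append(i)
--         else:
--             initial_configuration_lines.append(line)
--     return initial_configuration_lines, instruction_lines, indices
-- ===== SOURCE B (Python) =====
-- def get_initial_configuration_and_instructions_from_lines(lines):
--     lines = list(lines)
--     try:
--         sep = lines.index('')
--         head, tail = lines[:sep], lines[sep + 1:]
--     except ValueError:
--         head, tail = lines, []
--     instruction_lines = [line for line in tail if line != '']
--     initial_configuration_lines = [line for line in head if '[' in line or ']' in line]
--     indices = [i
--                for line in head if '[' not in line and ']' not in line
--                for i, char in enumerate(line) if char != ' ']
--     return initial_configuration_lines, instruction_lines, indices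
-- ===== Notes on version B (the rewrite author's own statement) =====
-- stated objective: alternative
-- what changed: A threads a found_separator_line flag through one stateful loop over all lines; B first locates the first empty line with list.index to split the input into a head and a tail slice, then builds each of the three outputs by its own comprehension/filter over the relevant slice.
import Mathlib
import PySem

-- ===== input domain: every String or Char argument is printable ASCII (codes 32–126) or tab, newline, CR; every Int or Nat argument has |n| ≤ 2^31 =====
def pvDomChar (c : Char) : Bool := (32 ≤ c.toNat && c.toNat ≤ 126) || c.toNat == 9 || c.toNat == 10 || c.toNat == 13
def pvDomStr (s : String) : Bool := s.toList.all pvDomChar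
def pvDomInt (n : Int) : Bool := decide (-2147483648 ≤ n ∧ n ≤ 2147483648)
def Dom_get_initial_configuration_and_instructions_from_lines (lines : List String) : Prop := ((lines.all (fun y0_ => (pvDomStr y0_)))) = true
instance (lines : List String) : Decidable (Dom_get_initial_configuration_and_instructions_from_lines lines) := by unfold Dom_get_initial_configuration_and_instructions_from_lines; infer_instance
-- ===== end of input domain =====

-- B replaces A's flag-threaded single loop by an index?-based split into head/tail slices
-- followed by independent filters/flatMap per output (alternative decomposition, same cost).


-- ===== PORT A =====
-- inner `for i, char in enumerate(line): if char != ' ': indices.append(i)`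
def pvLineIdxA (line : String) (idx : List Int) : List Int :=
  (PySem.List.enumerate line.toList).foldl
    (fun acc p => if p.2 ≠ ' ' then acc ++ [p.1] else acc) idx

-- the `for line in lines` loop with its state (flag, the three accumulators)
def pvALoop : List String → Bool → List String → List String → List Int →
    List String × List String × List Int
  | [], _, cfg, instr, idx => (cfg, instr, idx)
  | line :: rest, flag, cfg, instr, idx =>
    if line = "" then pvALoop rest true cfg instr idx
    else if flag then pvALoop rest flag cfg (instr ++ [line]) idx
    -- '[' not in line and ']' not in line : single-char membership, exact
    else if ¬ ('[' ∈ line.toList) ∧ ¬ (']' ∈ line.toList) then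
      pvALoop rest flag cfg instr (pvLineIdxA line idx)
    else pvALoop rest flag (cfg ++ [line]) instr idx

def get_initial_configuration_and_instructions_from_lines (lines : List String) :
    List String × List String × List Int :=
  pvALoop lines false [] [] []

-- ===== PORT B =====
-- '[' in line or ']' in line  (single-char membership, exact)
def pvBr (line : String) : Bool := line.toList.contains '[' || line.toList.contains ']'

-- [i for i, char in enumerate(line) if char != ' ']
def pvLineIdxB (line : String) : List Int :=
  (PySem.List.enumerate line.toList).filterMap
    (fun p => if p.2 ≠ ' ' then some p.1 else none)

def get_initial_configuration_and_instructions_from_lines_alt (lines : List String) :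
    List String × List String × List Int :=
  let ht : List String × List String :=
    match PySem.List.index? lines "" with
    | some sep => (lines.take sep, lines.drop (sep + 1))   -- lines[:sep], lines[sep+1:]
    | none => (lines, [])
  (ht.1.filter (fun l => pvBr l),
   ht.2.filter (fun l => l != ""),
   (ht.1.filter (fun l => !pvBr l)).flatMap pvLineIdxB)

-- ===== PRECONDITION & SPEC =====
def Spec_get_initial_configuration_and_instructions_from_lines (lines : List String) (out : List String × List String × List Int) : Prop := out = get_initial_configuration_and_instructions_from_lines_alt lines
instance (lines : List String) (out : List String × List String × List Int) : Decidable (Spec_get_initial_configuration_and_instructions_from_lines lines out) := by unfold Spec_get_initial_configuration_and_instructions_from_lines; infer_instance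

-- ===== CLAIM (what is proved, stated in full; the proofs are below) =====
def Claim_equal_get_initial_configuration_and_instructions_from_lines : Prop := ∀ (lines : List String), Dom_get_initial_configuration_and_instructions_from_lines lines → Spec_get_initial_configuration_and_instructions_from_lines lines (get_initial_configuration_and_instructions_from_lines lines)

-- ===== LEMMAS AND PROOFS =====

-- head/tail of B's split, as standalone functions for the induction
def pvHead (lines : List String) : List String :=
  match PySem.List.index? lines "" with
  | some sep => lines.take sep
  | none => lines

def pvTail (lines : List String) : List String :=
  match PySem.List.index? lines "" with
  | some sep => lines.drop (sep + 1)
  | none => []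

theorem pvAlt_eq (lines : List String) :
    get_initial_configuration_and_instructions_from_lines_alt lines =
      ((pvHead lines).filter (fun l => pvBr l),
       (pvTail lines).filter (fun l => l != ""),
       ((pvHead lines).filter (fun l => !pvBr l)).flatMap pvLineIdxB) := by
  unfold get_initial_configuration_and_instructions_from_lines_alt pvHead pvTail
  cases PySem.List.index? lines "" <;> rfl

theorem pvHead_nil_cons (rest : List String) : pvHead ("" :: rest) = [] := by
  unfold pvHead; rw [PySem.List.index?_cons_self]; rfl

theorem pvTail_nil_cons (rest : List String) : pvTail ("" :: rest) = rest := by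
  unfold pvTail; rw [PySem.List.index?_cons_self]; simp

theorem pvHead_cons (line : String) (rest : List String) (h : line ≠ "") :
    pvHead (line :: rest) = line :: pvHead rest := by
  unfold pvHead
  rw [PySem.List.index?_cons_of_ne rest h]
  cases PySem.List.index? rest "" <;> simp

theorem pvTail_cons (line : String) (rest : List String) (h : line ≠ "") :
    pvTail (line :: rest) = pvTail rest := by
  unfold pvTail
  rw [PySem.List.index?_cons_of_ne rest h]
  cases PySem.List.index? rest "" <;> simp [List.drop_succ_cons]

-- A's inner fold = append of B's comprehension
theorem pvLineIdx_eq (line : String) (idx : List Int) :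
    pvLineIdxA line idx = idx ++ pvLineIdxB line := by
  unfold pvLineIdxA pvLineIdxB
  generalize PySem.List.enumerate line.toList = ps
  induction ps generalizing idx with
  | nil => simp
  | cons p ps ih =>
      by_cases hp : p.2 = ' ' <;> simp only [List.foldl_cons, List.filterMap_cons, hp,
        ne_eq, not_true_eq_false, not_false_eq_true, if_false, if_true, ih]; simp

-- the bracket test of A versus the Bool pvBr of B
theorem pvBr_false_iff (line : String) :
    (¬ ('[' ∈ line.toList) ∧ ¬ (']' ∈ line.toList)) ↔ pvBr line = false := by
  simp [pvBr]

-- once the flag is set, A only collects non-empty lines into instr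
theorem pvALoop_true (rest : List String) (cfg instr : List String) (idx : List Int) :
    pvALoop rest true cfg instr idx = (cfg, instr ++ rest.filter (fun l => l != ""), idx) := by
  induction rest generalizing instr with
  | nil => simp [pvALoop]
  | cons line rest ih =>
      by_cases h : line = ""
      · subst h; simp [pvALoop, ih]
      · simp [pvALoop, h, ih]

-- before the flag, A's loop computes B's three slice-expressions
theorem pvALoop_false (rest : List String) (cfg instr : List String) (idx : List Int) :
    pvALoop rest false cfg instr idx =
      (cfg ++ (pvHead rest).filter (fun l => pvBr l),
       instr ++ (pvTail rest).filter (fun l => l != ""),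
       idx ++ ((pvHead rest).filter (fun l => !pvBr l)).flatMap pvLineIdxB) := by
  induction rest generalizing cfg instr idx with
  | nil => simp [pvALoop, pvHead, pvTail, PySem.List.index?]
  | cons line rest ih =>
      by_cases h : line = ""
      · subst h
        simp [pvALoop, pvALoop_true, pvHead_nil_cons, pvTail_nil_cons]
      · rw [pvHead_cons line rest h, pvTail_cons line rest h]
        by_cases hb : pvBr line = false
        · have hcond : ¬ ('[' ∈ line.toList) ∧ ¬ (']' ∈ line.toList) :=
            (pvBr_false_iff line).mpr hb
          simp only [pvALoop, if_neg h, if_pos hcond, Bool.false_eq_true, if_false]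
          rw [pvLineIdx_eq, ih]
          simp [hb, List.append_assoc]
        · have hbt : pvBr line = true := by revert hb; cases pvBr line <;> simp
          have hcond : ¬ (¬ ('[' ∈ line.toList) ∧ ¬ (']' ∈ line.toList)) := by
            intro hc; rw [(pvBr_false_iff line).mp hc] at hbt; exact Bool.false_ne_true hbt
          simp only [pvALoop, if_neg h, if_neg hcond, Bool.false_eq_true, if_false]
          rw [ih]
          simp [hbt, List.append_assoc]

-- ===== VERDICT (by name: the statement is the Claim_ definition above) =====
theorem get_initial_configuration_and_instructions_from_lines_spec : Claim_equal_get_initial_configuration_and_instructions_from_lines := by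
  intro lines _
  unfold Spec_get_initial_configuration_and_instructions_from_lines
  rw [pvAlt_eq]
  unfold get_initial_configuration_and_instructions_from_lines
  rw [pvALoop_false]
  simp
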